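-- pv_equiv track=rewrite | github.com/karimtouma/estimate | src/agents/orchestrator.py | find_sequence_patterns
-- ===== SOURCE A (Python) =====
-- from typing import Dict, List, Any, Optional
--
-- def find_sequence_patterns(sequence: List[str]) -> List[List[str]]:
--     """Find common subsequence patterns."""
--     patterns = []
--
--     # Look for common 2-3 element sequences
--     for length in [2, 3]:
--         for i in range(len(sequence) - length + 1):
--             subseq = sequence[i:i+length]
--
--             # Count occurrences of this subsequence
--             count = 0
--             for j in range(len(sequence) - length + 1):
--                 if sequence[j:j+length] == subseq:
--                     count += 1
--
--             # If it appears multiple times, it's a pattern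
--             if count > 1 and subseq not in patterns:
--                 patterns.append(subseq)
--
--     return patterns
-- ===== SOURCE B (Python) =====
-- from collections import Counter
--
-- def find_sequence_patterns(sequence):
--     """Find common subsequence patterns (hash-count version)."""
--     patterns = []
--     n = len(sequence)
--     for length in (2, 3):
--         grams = [tuple(sequence[i:i+length]) for i in range(n - length + 1)]
--         counts = Counter(grams)
--         seen = set()
--         for g in grams:
--             if counts[g] > 1 and g not in seen:
--                 seen.add(g)
--                 patterns.append(list(g))
--     return patterns
-- ===== Notes on version B (the rewrite author's own statement) =====
-- stated objective: faster
-- what changed: Replaces A's per-window rescan of all windows (and list membership dedup) with a single Counter pass over the window list plus an ordered second pass using a seen-set for dedup.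
import Mathlib
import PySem

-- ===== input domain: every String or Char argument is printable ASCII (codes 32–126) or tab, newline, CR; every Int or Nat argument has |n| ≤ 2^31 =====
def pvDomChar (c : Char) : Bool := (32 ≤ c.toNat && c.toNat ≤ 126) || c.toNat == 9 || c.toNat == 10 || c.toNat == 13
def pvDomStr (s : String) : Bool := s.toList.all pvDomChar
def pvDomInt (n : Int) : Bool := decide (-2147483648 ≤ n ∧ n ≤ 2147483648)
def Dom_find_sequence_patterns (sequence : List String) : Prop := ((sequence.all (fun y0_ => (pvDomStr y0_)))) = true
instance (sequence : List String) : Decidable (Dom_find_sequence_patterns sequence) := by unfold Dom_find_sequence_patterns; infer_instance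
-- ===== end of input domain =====

-- B replaces A's quadratic per-window rescan count by one Counter pass plus an ordered seen-set pass (objective: faster).

-- ===== PORT A =====
-- inner loop of A: count occurrences of subseq among all windows of the given length
def pvCountA (sequence : List String) (length : Int) (subseq : List String) : Int :=
  (PySem.List.pyRange 0 ((sequence.length : Int) - length + 1) 1).foldl
    (fun count j =>
      if PySem.List.slice sequence (some j) (some (j + length)) = subseq then count + 1 else count) 0

-- one iteration of A's outer 'for length in [2, 3]' loop
def pvPassA (sequence : List String) (length : Int) (patterns : List (List String)) : List (List String) :=
  (PySem.List.pyRange 0 ((sequence.length : Int) - length + 1) 1).foldl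
    (fun patterns i =>
      let subseq := PySem.List.slice sequence (some i) (some (i + length))
      if pvCountA sequence length subseq > 1 ∧ subseq ∉ patterns then patterns ++ [subseq]
      else patterns)
    patterns

def find_sequence_patterns (sequence : List String) : List (List String) :=
  [(2 : Int), 3].foldl (fun patterns length => pvPassA sequence length patterns) []

-- ===== PORT B =====
-- grams = [tuple(sequence[i:i+length]) for i in range(n - length + 1)]
def pvGrams (sequence : List String) (length : Int) : List (List String) :=
  (PySem.List.pyRange 0 ((sequence.length : Int) - length + 1) 1).map
    (fun i => PySem.List.slice sequence (some i) (some (i + length)))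

-- one iteration of B's 'for length in (2, 3)' loop: Counter + ordered seen-set pass
def pvPassB (sequence : List String) (length : Int) (patterns : List (List String)) : List (List String) :=
  let grams := pvGrams sequence length
  let counts := PySem.Dict.counter grams
  (grams.foldl
    (fun (acc : List (List String) × PySem.Set (List String)) g =>
      if counts.getD g 0 > 1 ∧ ¬ PySem.Set.contains acc.2 g then (acc.1 ++ [g], PySem.Set.add acc.2 g)
      else acc)
    (patterns, PySem.Set.empty)).1

def find_sequence_patterns_alt (sequence : List String) : List (List String) :=
  [(2 : Int), 3].foldl (fun patterns length => pvPassB sequence length patterns) []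

-- ===== PRECONDITION & SPEC =====
def Spec_find_sequence_patterns (sequence : List String) (out : List (List String)) : Prop := out = find_sequence_patterns_alt sequence
instance (sequence : List String) (out : List (List String)) : Decidable (Spec_find_sequence_patterns sequence out) := by unfold Spec_find_sequence_patterns; infer_instance

-- ===== CLAIM (what is proved, stated in full; the proofs are below) =====
def Claim_equal_find_sequence_patterns : Prop := ∀ (sequence : List String), Dom_find_sequence_patterns sequence → Spec_find_sequence_patterns sequence (find_sequence_patterns sequence)

-- ===== LEMMAS AND PROOFS =====

-- A's per-window rescan computes exactly the multiplicity of the window among all windows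
lemma pvCountA_eq_count (s : List String) (len : Int) (g : List String) :
    pvCountA s len g = ((pvGrams s len).count g : Int) := by
  unfold pvCountA pvGrams
  calc List.foldl
        (fun count j => if PySem.List.slice s (some j) (some (j + len)) = g then count + 1 else count)
        (0 : Int) (PySem.List.pyRange 0 ((s.length : Int) - len + 1) 1)
      = List.foldl (fun count x => if x = g then count + 1 else count) (0 : Int)
          ((PySem.List.pyRange 0 ((s.length : Int) - len + 1) 1).map
            (fun i => PySem.List.slice s (some i) (some (i + len)))) :=
        (List.foldl_map (f := fun i => PySem.List.slice s (some i) (some (i + len)))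
          (g := fun count x => if x = g then count + 1 else count)).symm
    _ = _ := by
        rw [PySem.List.foldl_ite_add_one]
        simp only [List.count_eq_countP, List.countP_map, zero_add, Nat.cast_inj]
        refine List.countP_congr fun x _ => ?_
        simp only [Function.comp_apply, beq_iff_eq, decide_eq_true_eq]

-- elements of pvGrams s len are windows of length len.toNat (for 0 < len)
lemma length_mem_pvGrams (s : List String) (len : Int) (hlen : 0 < len)
    (g : List String) (hg : g ∈ pvGrams s len) : g.length = len.toNat := by
  unfold pvGrams at hg
  rcases List.mem_map.mp hg with ⟨i, hi, rfl⟩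
  rw [PySem.List.mem_pyRange_one] at hi
  rw [PySem.List.slice_toNat s hi.1 (by omega)]
  simp only [List.length_take, List.length_drop]
  omega

-- the membership-dedup fold: outputs come from the accumulator or the scanned list
lemma mem_foldl_append_if (c : List String → Prop) [DecidablePred c] :
    ∀ (ts p : List (List String)) (x : List String),
    x ∈ ts.foldl (fun pats t => if c t ∧ t ∉ pats then pats ++ [t] else pats) p →
    x ∈ p ∨ x ∈ ts := by
  intro ts
  induction ts with
  | nil => intro p x hx; exact Or.inl hx
  | cons t ts ih =>
    intro p x hx
    simp only [List.foldl_cons] at hx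
    rcases ih _ x hx with h | h
    · split at h
      · rcases List.mem_append.mp h with h | h
        · exact Or.inl h
        · simp at h; subst h; simp
      · exact Or.inl h
    · simp [h]

-- core: A's membership-dedup fold equals B's seen-set fold, given that the seen set mirrors
-- the freshly appended suffix q and nothing scanned lies in the old prefix p0
lemma fold_seen_eq (c : List String → Prop) [DecidablePred c] :
    ∀ (ts q p0 : List (List String)) (seen : PySem.Set (List String)),
    (∀ x, x ∈ seen ↔ x ∈ q) →
    (∀ t ∈ ts, t ∉ p0) →
    ts.foldl (fun pats t => if c t ∧ t ∉ pats then pats ++ [t] else pats) (p0 ++ q)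
      = (ts.foldl
          (fun (acc : List (List String) × PySem.Set (List String)) t =>
            if c t ∧ ¬ PySem.Set.contains acc.2 t then (acc.1 ++ [t], PySem.Set.add acc.2 t) else acc)
          (p0 ++ q, seen)).1 := by
  intro ts
  induction ts with
  | nil => intro q p0 seen _ _; rfl
  | cons t ts ih =>
    intro q p0 seen hseen hp0
    have ht : t ∉ p0 := hp0 t (List.mem_cons_self)
    have hmem : (t ∈ p0 ++ q) ↔ t ∈ q := by simp [ht]
    have hcon : (PySem.Set.contains seen t = true) ↔ t ∈ q := by
      rw [PySem.Set.contains_iff]; exact hseen t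
    simp only [List.foldl_cons]
    by_cases hcnd : c t ∧ t ∉ q
    · rw [if_pos ⟨hcnd.1, fun h => hcnd.2 (hmem.mp h)⟩,
          if_pos ⟨hcnd.1, fun h => hcnd.2 (hcon.mp h)⟩]
      rw [List.append_assoc]
      exact ih (q ++ [t]) p0 (PySem.Set.add seen t)
        (by intro x
            rw [PySem.Set.mem_add]
            simp only [List.mem_append, List.mem_singleton]
            exact or_congr_left (hseen x))
        (fun u hu => hp0 u (List.mem_cons_of_mem t hu))
    · rw [if_neg (by rw [hmem]; exact fun h => hcnd ⟨h.1, h.2⟩),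
          if_neg (by rw [not_and, hcon]; exact fun h1 h2 => hcnd ⟨h1, h2⟩)]
      exact ih q p0 seen hseen (fun u hu => hp0 u (List.mem_cons_of_mem t hu))

-- A's pass, rewritten as the same membership-dedup fold over the list of windows
lemma pvPassA_eq_gramsFold (s : List String) (len : Int) (p : List (List String)) :
    pvPassA s len p
      = (pvGrams s len).foldl
          (fun pats g => if ((pvGrams s len).count g : Int) > 1 ∧ g ∉ pats then pats ++ [g] else pats) p := by
  unfold pvPassA
  calc List.foldl
        (fun patterns i =>
          let subseq := PySem.List.slice s (some i) (some (i + len))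
          if pvCountA s len subseq > 1 ∧ subseq ∉ patterns then patterns ++ [subseq] else patterns)
        p (PySem.List.pyRange 0 ((s.length : Int) - len + 1) 1)
      = List.foldl (fun pats g => if pvCountA s len g > 1 ∧ g ∉ pats then pats ++ [g] else pats)
          p (pvGrams s len) :=
        (List.foldl_map (f := fun i => PySem.List.slice s (some i) (some (i + len)))
          (g := fun pats g => if pvCountA s len g > 1 ∧ g ∉ pats then pats ++ [g] else pats)).symm
    _ = _ := by simp only [pvCountA_eq_count]

-- one pass of A equals one pass of B when nothing scanned is already in patterns
lemma pvPassA_eq_pvPassB (s : List String) (len : Int) (p : List (List String))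
    (hp : ∀ t ∈ pvGrams s len, t ∉ p) :
    pvPassA s len p = pvPassB s len p := by
  rw [pvPassA_eq_gramsFold]
  unfold pvPassB
  simp only [PySem.Dict.getD_counter]
  have := fold_seen_eq (fun g => ((pvGrams s len).count g : Int) > 1)
    (pvGrams s len) [] p PySem.Set.empty (by simp [PySem.Set.empty]) hp
  simpa using this

-- membership bound for A's pass output
lemma mem_pvPassA (s : List String) (len : Int) (p : List (List String)) (x : List String)
    (hx : x ∈ pvPassA s len p) : x ∈ p ∨ x ∈ pvGrams s len := by
  rw [pvPassA_eq_gramsFold] at hx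
  exact mem_foldl_append_if (fun g => ((pvGrams s len).count g : Int) > 1) _ p x hx

-- ===== VERDICT (by name: the statement is the Claim_ definition above) =====
theorem find_sequence_patterns_spec : Claim_equal_find_sequence_patterns := by
  intro s _
  unfold Spec_find_sequence_patterns find_sequence_patterns find_sequence_patterns_alt
  simp only [List.foldl]
  have h2 : pvPassA s 2 [] = pvPassB s 2 [] :=
    pvPassA_eq_pvPassB s 2 [] (by intro t _ ht; simp at ht)
  rw [← h2]
  apply pvPassA_eq_pvPassB
  intro t ht hmem
  have h3 : t.length = (3 : Int).toNat := length_mem_pvGrams s 3 (by norm_num) t ht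
  rcases mem_pvPassA s 2 [] t hmem with h | h
  · simp at h
  · have h2' : t.length = (2 : Int).toNat := length_mem_pvGrams s 2 (by norm_num) t h
    omega
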